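-- pv_equiv track=rewrite | github.com/courtneyfugate-ctrl/logic-miner-engine | src/logic_miner/core/mahler.py | compute_coefficients
-- ===== SOURCE A (Python) =====
-- def compute_coefficients(inputs, outputs, max_degree=10):
--     """
--     Computes Mahler coefficients a_n using Forward Differences.
--     Ideally requires inputs to be 0, 1, 2, ... N.
--     If inputs are sparse, this naive implementation might fail.
--     Current assumption: inputs are consecutive integers starting at 0 (Logic Traces).
--     """
--     # Map inputs to outputs dictionary
--     data_map = {x: y for x, y in zip(inputs, outputs)}
--
--     # Check if we have 0..max_degree
--     # If not, we can't easily compute n-th difference at 0.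
--     # We limit max_degree to available data length.
--     limit = min(max_degree, len(data_map))
--
--     # Forward Difference Table
--     # diffs[0] = row of f(x)
--     row = [data_map.get(i, 0) for i in range(limit)]
--
--     coeffs = []
--
--     # a_0 = f(0)
--     coeffs.append(row[0])
--
--     for n in range(1, limit):
--         # Compute next row of differences
--         new_row = []
--         for i in range(len(row) - 1):
--             diff = row[i+1] - row[i]
--             new_row.append(diff)
--
--         row = new_row
--         if not row: break
--
--         # a_n = delta^n f(0) = row[0]
--         coeffs.append(row[0])
--
--     return coeffs
-- ===== SOURCE B (Python) =====
-- def compute_coefficients(inputs, outputs, max_degree=10):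
--     """Mahler coefficients via the Newton closed form a_n = sum_k (-1)**(n-k)*C(n,k)*f(k)."""
--     data_map = {x: y for x, y in zip(inputs, outputs)}
--     limit = min(max_degree, len(data_map))
--     f = [data_map.get(i, 0) for i in range(limit)]
--     coeffs = []
--     for n in range(limit):
--         total = 0
--         c = 1  # running binomial C(n, k)
--         for k in range(n + 1):
--             total += (-1) ** (n - k) * c * f[k]
--             c = c * (n - k) // (k + 1)
--         coeffs.append(total)
--     return coeffs
-- ===== Notes on version B (the rewrite author's own statement) =====
-- stated objective: alternative
-- what changed: Replaces the iterative forward-difference table with the Newton/Mahler closed form a_n = sum_{k<=n} (-1)^(n-k)*C(n,k)*f(k), computing each coefficient independently with a running binomial coefficient.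
import Mathlib
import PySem

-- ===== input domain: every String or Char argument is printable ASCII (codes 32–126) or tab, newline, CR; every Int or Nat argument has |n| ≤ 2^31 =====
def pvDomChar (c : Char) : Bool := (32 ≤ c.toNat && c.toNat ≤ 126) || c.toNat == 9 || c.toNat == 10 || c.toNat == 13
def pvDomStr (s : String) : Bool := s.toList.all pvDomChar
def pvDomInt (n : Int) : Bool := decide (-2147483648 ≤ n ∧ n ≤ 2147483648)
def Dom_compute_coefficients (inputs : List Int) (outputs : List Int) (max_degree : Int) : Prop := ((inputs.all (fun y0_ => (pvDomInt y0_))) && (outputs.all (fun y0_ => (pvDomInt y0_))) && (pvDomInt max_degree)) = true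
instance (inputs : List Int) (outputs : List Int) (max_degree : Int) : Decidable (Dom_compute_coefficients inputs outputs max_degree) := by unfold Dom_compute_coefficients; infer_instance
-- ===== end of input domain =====

-- B replaces A's iterative forward-difference table by the Newton/Mahler closed form
-- a_n = Σ_{k≤n} (-1)^(n-k)·C(n,k)·f(k) (objective: alternative; not claimed faster).

-- ===== PORT A =====
def compute_coefficients (inputs : List Int) (outputs : List Int) (max_degree : Int) : List Int :=
  -- data_map = {x: y for x, y in zip(inputs, outputs)}
  let data_map : PySem.Dict Int Int :=
    (inputs.zip outputs).foldl (fun d p => d.insert p.1 p.2) PySem.Dict.empty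
  -- limit = min(max_degree, len(data_map))
  let limit : Int := min max_degree (data_map.size : Int)
  -- row = [data_map.get(i, 0) for i in range(limit)]
  let row : List Int := (PySem.List.pyRange 0 limit 1).map (fun i => data_map.getD i 0)
  -- coeffs = []; coeffs.append(row[0])  — row[0] raises IndexError on an empty row: outside Pre_
  let coeffs : List Int := [PySem.List.pyGetD row 0 0]
  -- for n in range(1, limit): …   (state: row, coeffs, broke-flag for the 'break')
  let st :=
    (PySem.List.pyRange 1 limit 1).foldl
      (fun (s : List Int × List Int × Bool) _n =>
        if s.2.2 then s
        else
          -- new_row = [row[i+1] - row[i] for i in range(len(row) - 1)]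
          let new_row : List Int :=
            (PySem.List.pyRange 0 (PySem.List.len s.1 - 1) 1).map
              (fun i => PySem.List.pyGetD s.1 (i + 1) 0 - PySem.List.pyGetD s.1 i 0)
          if new_row = [] then (new_row, s.2.1, true)
          else (new_row, s.2.1 ++ [PySem.List.pyGetD new_row 0 0], false))
      (row, coeffs, false)
  st.2.1

-- ===== PORT B =====
def compute_coefficients_alt (inputs : List Int) (outputs : List Int) (max_degree : Int) : List Int :=
  let data_map : PySem.Dict Int Int :=
    (inputs.zip outputs).foldl (fun d p => d.insert p.1 p.2) PySem.Dict.empty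
  let limit : Int := min max_degree (data_map.size : Int)
  -- f = [data_map.get(i, 0) for i in range(limit)]
  let f : List Int := (PySem.List.pyRange 0 limit 1).map (fun i => data_map.getD i 0)
  -- for n in range(limit): total = 0; c = 1; for k in range(n + 1):
  --   total += (-1) ** (n - k) * c * f[k]; c = c * (n - k) // (k + 1)
  -- (-1) ** (n - k): the exponent n - k is ≥ 0 for every k in range(n + 1), so .toNat is exact
  (PySem.List.pyRange 0 limit 1).foldl (fun coeffs n =>
    let r :=
      (PySem.List.pyRange 0 (n + 1) 1).foldl
        (fun (s : Int × Int) k =>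
          (s.1 + (-1) ^ (n - k).toNat * s.2 * PySem.List.pyGetD f k 0,
           PySem.Int.floordiv (s.2 * (n - k)) (k + 1)))
        (0, 1)
    coeffs ++ [r.1]) []

-- ===== PRECONDITION & SPEC =====
-- Pre_ excludes exactly the inputs where limit = min(max_degree, len(data_map)) < 1, on which
-- A's row[0] raises IndexError (len(data_map) ≥ 1 iff both lists are nonempty).
def Pre_compute_coefficients (inputs : List Int) (outputs : List Int) (max_degree : Int) : Prop :=
  1 ≤ max_degree ∧ inputs ≠ [] ∧ outputs ≠ []
instance (inputs : List Int) (outputs : List Int) (max_degree : Int) : Decidable (Pre_compute_coefficients inputs outputs max_degree) := by unfold Pre_compute_coefficients; infer_instance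

def pvWitness_compute_coefficients : List Int × List Int × Int := ([0, 1, 2], [1, 3, 7], 10)

def Spec_compute_coefficients (inputs : List Int) (outputs : List Int) (max_degree : Int) (out : List Int) : Prop := out = compute_coefficients_alt inputs outputs max_degree
instance (inputs : List Int) (outputs : List Int) (max_degree : Int) (out : List Int) : Decidable (Spec_compute_coefficients inputs outputs max_degree out) := by unfold Spec_compute_coefficients; infer_instance

-- ===== CLAIM (what is proved, stated in full; the proofs are below) =====
def Claim_equal_compute_coefficients : Prop := ∀ (inputs : List Int) (outputs : List Int) (max_degree : Int), Dom_compute_coefficients inputs outputs max_degree → Pre_compute_coefficients inputs outputs max_degree → Spec_compute_coefficients inputs outputs max_degree (compute_coefficients inputs outputs max_degree)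


-- ===== LEMMAS AND PROOFS =====

-- one forward-difference step, exactly A's inner loop
def dstep (xs : List Int) : List Int :=
  (PySem.List.pyRange 0 (PySem.List.len xs - 1) 1).map
    (fun i => PySem.List.pyGetD xs (i + 1) 0 - PySem.List.pyGetD xs i 0)

def Arun (f : List Int) (limit : Int) : List Int :=
  ((PySem.List.pyRange 1 limit 1).foldl
      (fun (s : List Int × List Int × Bool) _n =>
        if s.2.2 then s
        else
          let new_row : List Int := dstep s.1
          if new_row = [] then (new_row, s.2.1, true)
          else (new_row, s.2.1 ++ [PySem.List.pyGetD new_row 0 0], false))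
      (f, [PySem.List.pyGetD f 0 0], false)).2.1

def Brun (f : List Int) (limit : Int) : List Int :=
  (PySem.List.pyRange 0 limit 1).foldl (fun coeffs n =>
    let r :=
      (PySem.List.pyRange 0 (n + 1) 1).foldl
        (fun (s : Int × Int) k =>
          (s.1 + (-1) ^ (n - k).toNat * s.2 * PySem.List.pyGetD f k 0,
           PySem.Int.floordiv (s.2 * (n - k)) (k + 1)))
        (0, 1)
    coeffs ++ [r.1]) []

lemma A_eq (inputs outputs : List Int) (max_degree : Int) :
    compute_coefficients inputs outputs max_degree =
      Arun ((PySem.List.pyRange 0 (min max_degree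
              (((inputs.zip outputs).foldl (fun d p => d.insert p.1 p.2) PySem.Dict.empty : PySem.Dict Int Int).size : Int)) 1).map
              (fun i => ((inputs.zip outputs).foldl (fun d p => d.insert p.1 p.2) PySem.Dict.empty : PySem.Dict Int Int).getD i 0))
          (min max_degree (((inputs.zip outputs).foldl (fun d p => d.insert p.1 p.2) PySem.Dict.empty : PySem.Dict Int Int).size : Int)) := rfl

lemma B_eq (inputs outputs : List Int) (max_degree : Int) :
    compute_coefficients_alt inputs outputs max_degree =
      Brun ((PySem.List.pyRange 0 (min max_degree
              (((inputs.zip outputs).foldl (fun d p => d.insert p.1 p.2) PySem.Dict.empty : PySem.Dict Int Int).size : Int)) 1).map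
              (fun i => ((inputs.zip outputs).foldl (fun d p => d.insert p.1 p.2) PySem.Dict.empty : PySem.Dict Int Int).getD i 0))
          (min max_degree (((inputs.zip outputs).foldl (fun d p => d.insert p.1 p.2) PySem.Dict.empty : PySem.Dict Int Int).size : Int)) := rfl

lemma dstep_length (xs : List Int) : (dstep xs).length = xs.length - 1 := by
  simp [dstep, PySem.List.length_pyRange_one, PySem.List.len_eq]

lemma dstep_getD (xs : List Int) (j : ℕ) (h : j + 1 < xs.length) :
    (dstep xs).getD j 0 = xs.getD (j + 1) 0 - xs.getD j 0 := by
  have hc : PySem.List.len xs - 1 = ((xs.length - 1 : ℕ) : Int) := by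
    rw [PySem.List.len_eq]; omega
  rw [dstep, hc, PySem.List.pyRange_zero_nat, List.map_map,
    PySem.List.getD_map_range _ _ _ _ (by omega)]
  have h1 : ((j : Int) + 1) = ((j + 1 : ℕ) : Int) := by push_cast; ring
  simp only [Function.comp_apply, h1, PySem.List.pyGetD_natCast]

lemma iter_length (xs : List Int) (n : ℕ) : (dstep^[n] xs).length = xs.length - n := by
  induction n with
  | zero => simp
  | succ n ih => rw [Function.iterate_succ_apply', dstep_length, ih]; omega

lemma iter_getD (xs : List Int) (n j : ℕ) (h : j + n < xs.length) :
    (dstep^[n] xs).getD j 0 = (fwdDiff 1)^[n] (fun i : ℕ => xs.getD i 0) j := by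
  induction n generalizing j with
  | zero => simp
  | succ n ih =>
    rw [Function.iterate_succ_apply', Function.iterate_succ_apply' (fwdDiff 1)]
    rw [dstep_getD _ j (by rw [iter_length]; omega)]
    rw [ih (j + 1) (by omega), ih j (by omega)]
    simp [fwdDiff]

lemma comb_step (n k : ℕ) :
    PySem.Int.floordiv ((n.choose k : Int) * ((n : Int) - (k : Int))) ((k : Int) + 1)
      = (n.choose (k + 1) : Int) := by
  have hpos : (0 : Int) < (k : Int) + 1 := by positivity
  rw [PySem.Int.floordiv_eq_ediv_of_pos hpos]
  by_cases hk : k < n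
  · have h1 : ((n : Int) - k) = ((n - k : ℕ) : Int) := by omega
    rw [h1]
    have h2 : ((n.choose k : ℕ) : Int) * ((n - k : ℕ) : Int) = ((n.choose (k+1) : ℕ) : Int) * ((k:Int) + 1) := by
      exact_mod_cast (Nat.choose_succ_right_eq n k).symm
    rw [h2, Int.mul_ediv_cancel _ (by omega)]
  · have hz : ((n.choose k : ℕ) : Int) * ((n : Int) - k) = 0 := by
      rcases eq_or_lt_of_le (Nat.le_of_not_lt hk) with h | h
      · simp [h]
      · simp [Nat.choose_eq_zero_of_lt h]
    rw [hz, Int.zero_ediv, Nat.choose_eq_zero_of_lt (by omega)]; simp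

lemma Binv (f : List Int) (n m : ℕ) (hm : m ≤ n + 1) :
    ((List.range m).map (fun (k : ℕ) => (k : Int))).foldl
      (fun (s : Int × Int) k =>
        (s.1 + (-1) ^ ((n : Int) - k).toNat * s.2 * PySem.List.pyGetD f k 0,
         PySem.Int.floordiv (s.2 * ((n : Int) - k)) (k + 1)))
      (0, 1)
    = (∑ k ∈ Finset.range m, ((-1 : ℤ) ^ (n - k) * (n.choose k)) * f.getD k 0,
       (n.choose m : Int)) := by
  induction m with
  | zero => simp
  | succ m ih =>
    rw [List.range_succ, List.map_append, List.foldl_append, ih (by omega),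
      List.map_cons, List.map_nil, List.foldl_cons, List.foldl_nil]
    have h2 : ((n : Int) - (m : ℕ)).toNat = n - m := by omega
    rw [Finset.sum_range_succ, comb_step, h2, PySem.List.pyGetD_natCast]

lemma head_iter_closed (f : List Int) (n : ℕ) (h : n < f.length) :
    (dstep^[n] f).getD 0 0 =
      ∑ k ∈ Finset.range (n + 1), ((-1 : ℤ) ^ (n - k) * (n.choose k)) * f.getD k 0 := by
  rw [iter_getD f n 0 (by omega), fwdDiff_iter_eq_sum_shift]
  refine Finset.sum_congr rfl fun k _ => ?_
  simp

lemma Ainv (f : List Int) (L : ℕ) (hL : f.length = L) (h1 : 0 < L)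
    (m : ℕ) (hm : m ≤ L - 1) :
    ((List.range m).map (fun (k : ℕ) => 1 + (k : Int))).foldl
      (fun (s : List Int × List Int × Bool) _n =>
        if s.2.2 then s
        else
          let new_row : List Int := dstep s.1
          if new_row = [] then (new_row, s.2.1, true)
          else (new_row, s.2.1 ++ [PySem.List.pyGetD new_row 0 0], false))
      (f, [PySem.List.pyGetD f 0 0], false)
    = (dstep^[m] f, (List.range (m + 1)).map (fun n => (dstep^[n] f).getD 0 0), false) := by
  induction m with
  | zero => simp [PySem.List.pyGetD_zero, List.range_succ]
  | succ m ih =>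
    rw [List.range_succ, List.map_append, List.foldl_append, ih (by omega),
      List.map_cons, List.map_nil, List.foldl_cons, List.foldl_nil]
    have hne : dstep (dstep^[m] f) ≠ [] := by
      have : (dstep (dstep^[m] f)).length = L - (m + 1) := by
        rw [← Function.iterate_succ_apply' dstep, iter_length, hL]
      intro hc
      rw [hc] at this
      simp at this
      omega
    simp only [Bool.false_eq_true, ite_false, hne]
    rw [← Function.iterate_succ_apply' dstep]
    simp [PySem.List.pyGetD_zero, List.range_succ]

lemma Arun_eq (f : List Int) (L : ℕ) (hL : f.length = L) (h1 : 0 < L) :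
    Arun f (L : Int) = (List.range L).map (fun n => (dstep^[n] f).getD 0 0) := by
  rw [Arun, PySem.List.pyRange_one]
  have h2 : ((L : Int) - 1).toNat = L - 1 := by omega
  rw [h2, Ainv f L hL h1 (L - 1) le_rfl]
  have h3 : L - 1 + 1 = L := by omega
  rw [h3]

lemma Brun_eq (f : List Int) (L : ℕ) :
    Brun f (L : Int) = (List.range L).map (fun n =>
      ∑ k ∈ Finset.range (n + 1), ((-1 : ℤ) ^ (n - k) * (n.choose k)) * f.getD k 0) := by
  rw [Brun, PySem.List.pyRange_zero_nat, List.foldl_map,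
    show (List.foldl _ ([] : List Int) (List.range L) = _) from
      PySem.List.foldl_append_singleton_eq_map
        (fun (n : ℕ) =>
          ((PySem.List.pyRange 0 ((n : Int) + 1) 1).foldl
            (fun (s : Int × Int) k =>
              (s.1 + (-1) ^ ((n : Int) - k).toNat * s.2 * PySem.List.pyGetD f k 0,
               PySem.Int.floordiv (s.2 * ((n : Int) - k)) (k + 1)))
            (0, 1)).1)
        (List.range L) []]
  rw [List.nil_append]
  refine List.map_congr_left fun n _ => ?_
  have h1 : ((n : Int) + 1) = ((n + 1 : ℕ) : Int) := by push_cast; ring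
  rw [h1, PySem.List.pyRange_zero_nat, Binv f n (n + 1) le_rfl]

lemma size_foldl_ge (l : List (Int × Int)) (d : PySem.Dict Int Int) :
    d.size ≤ (l.foldl (fun d p => d.insert p.1 p.2) d).size := by
  induction l generalizing d with
  | nil => simp
  | cons p l ih =>
    refine le_trans ?_ (ih (d.insert p.1 p.2))
    rw [PySem.Dict.size_insert]
    split <;> omega

lemma size_pos (inputs outputs : List Int) (hi : inputs ≠ []) (ho : outputs ≠ []) :
    1 ≤ (((inputs.zip outputs).foldl (fun d p => d.insert p.1 p.2) PySem.Dict.empty : PySem.Dict Int Int).size : Int) := by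
  obtain ⟨x, xs, rfl⟩ := List.exists_cons_of_ne_nil hi
  obtain ⟨y, ys, rfl⟩ := List.exists_cons_of_ne_nil ho
  have h := size_foldl_ge (xs.zip ys) (PySem.Dict.empty.insert x y)
  have h2 : (PySem.Dict.empty.insert x y : PySem.Dict Int Int).size = 1 := by
    rw [PySem.Dict.size_insert]; simp [PySem.Dict.contains_empty, PySem.Dict.size_empty]
  simp only [List.zip_cons_cons, List.foldl_cons]
  omega

-- ===== VERDICT (by name: the statement is the Claim_ definition above) =====
theorem compute_coefficients_spec : Claim_equal_compute_coefficients := by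
  intro inputs outputs max_degree _hDom hPre
  obtain ⟨h1, hi, ho⟩ := hPre
  unfold Spec_compute_coefficients
  rw [A_eq, B_eq]
  set dm : PySem.Dict Int Int := (inputs.zip outputs).foldl (fun d p => d.insert p.1 p.2) PySem.Dict.empty with hdm
  set limit : Int := min max_degree (dm.size : Int) with hlim
  have hlim1 : 1 ≤ limit := by
    have := size_pos inputs outputs hi ho
    rw [← hdm] at this; omega
  set f : List Int := (PySem.List.pyRange 0 limit 1).map (fun i => dm.getD i 0) with hf
  have hcast : limit = ((limit.toNat : ℕ) : Int) := by omega
  have hflen : f.length = limit.toNat := by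
    rw [hf, List.length_map, PySem.List.length_pyRange_one]; omega
  rw [hcast, Arun_eq f limit.toNat hflen (by omega), Brun_eq]
  refine List.map_congr_left fun n hn => ?_
  rw [List.mem_range] at hn
  rw [head_iter_closed f n (by omega)]
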